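-- pv_equiv track=rewrite | github.com/codeTMN/search-engine | 2D list/search.py | unique_authors
-- ===== SOURCE A (Python) =====
-- def unique_authors(count, metadata):
--     """
--     takes int and list as an argument, returns a list of article according to the number user specified.
--     """
--     duplicate = []
--     article = []
--     index = 0
--
--     for data in metadata:
--         if len(duplicate) < count:
--             if data[1].lower() not in duplicate:
--                 duplicate.append(data[1].lower())
--                 article.append(data)
--
--     return article
-- ===== SOURCE B (Python) =====
-- def unique_authors(count, metadata):
--     if count <= 0:
--         return []
--     lowered = [row[1].lower() for row in metadata]
--     kept = [row for i, row in enumerate(metadata) if lowered.index(lowered[i]) == i]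
--     return kept[:count]
-- ===== Notes on version B (the rewrite author's own statement) =====
-- stated objective: alternative
-- what changed: B keeps no seen-structure at all: it precomputes the lowered-author list in one pass, then keeps exactly the rows whose index is the first index of their lowered author (lowered.index(lowered[i]) == i), and slices the result to count afterwards; A's in-loop count gate and growing duplicate list are gone.
-- outside the precondition, e.g. on unique_authors(1, [['t', 'a'], ['u']]): A returns [['t', 'a']], B raises IndexError; on unique_authors(1, [['t']]): A raises IndexError, B raises IndexError
import Mathlib
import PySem

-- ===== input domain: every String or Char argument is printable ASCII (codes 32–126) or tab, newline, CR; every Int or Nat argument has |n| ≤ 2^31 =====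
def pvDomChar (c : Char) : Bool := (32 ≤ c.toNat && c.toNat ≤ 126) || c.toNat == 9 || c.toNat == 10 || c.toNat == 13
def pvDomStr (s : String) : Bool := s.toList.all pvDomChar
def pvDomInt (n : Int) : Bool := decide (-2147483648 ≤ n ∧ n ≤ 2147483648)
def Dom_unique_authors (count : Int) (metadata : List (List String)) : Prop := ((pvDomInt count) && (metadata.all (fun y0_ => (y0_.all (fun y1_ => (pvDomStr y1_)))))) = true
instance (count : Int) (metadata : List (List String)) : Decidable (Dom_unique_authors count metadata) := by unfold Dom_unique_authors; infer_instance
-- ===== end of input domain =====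

-- B keeps no seen-structure: it precomputes the lowered-author list, keeps the rows whose
-- index is the first index of their lowered author, and slices to count (objective: alternative).

-- ===== PORT A =====
-- one loop step of A: the count gate, data[1].lower(), the duplicate-list membership test
def uaStepA (count : Int) (st : List String × List (List String)) (data : List String) :
    List String × List (List String) :=
  if (st.1.length : Int) < count then
    match PySem.List.pyGet? data 1 with
    | none => st      -- Python raises IndexError here; excluded by Pre_unique_authors
    | some a =>
      let k := PySem.Str.lower a
      if st.1.contains k then st
      else (st.1 ++ [k], st.2 ++ [data])
  else st

def unique_authors (count : Int) (metadata : List (List String)) : List (List String) :=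
  (metadata.foldl (uaStepA count) ([], [])).2

-- ===== PORT B =====
-- row[1].lower() ; the .getD "" is unreachable inside Pre_unique_authors (rows have ≥ 2 fields)
def uaKey (row : List String) : String :=
  PySem.Str.lower ((PySem.List.pyGet? row 1).getD "")

def unique_authors_alt (count : Int) (metadata : List (List String)) : List (List String) :=
  if count ≤ 0 then []
  else
    let lowered := metadata.map uaKey
    let kept := (PySem.List.enumerate metadata).filterMap (fun p =>
      if (PySem.List.index? lowered ((PySem.List.pyGet? lowered p.1).getD "")).map
           (Int.ofNat) = some p.1
      then some p.2 else none)
    kept.take count.toNat      -- kept[:count] with count > 0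

-- ===== PRECONDITION & SPEC =====
-- Pre_ excludes metadata containing a row with fewer than two fields when count > 0: on such
-- input A raises IndexError unless count distinct authors were collected before the short row
-- (in which case A returns but B, which reads field 1 of every row, raises IndexError).
def Pre_unique_authors (count : Int) (metadata : List (List String)) : Prop :=
  count ≤ 0 ∨ ∀ r ∈ metadata, 2 ≤ r.length
instance (count : Int) (metadata : List (List String)) : Decidable (Pre_unique_authors count metadata) := by unfold Pre_unique_authors; infer_instance

def pvWitness_unique_authors : Int × List (List String) :=
  (2, [["t", "Alice"], ["u", "ALICE"], ["v", "bob"]])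

def Spec_unique_authors (count : Int) (metadata : List (List String)) (out : List (List String)) : Prop := out = unique_authors_alt count metadata
instance (count : Int) (metadata : List (List String)) (out : List (List String)) : Decidable (Spec_unique_authors count metadata out) := by unfold Spec_unique_authors; infer_instance

-- ===== CLAIM (what is proved, stated in full; the proofs are below) =====
def Claim_equal_unique_authors : Prop := ∀ (count : Int) (metadata : List (List String)), Dom_unique_authors count metadata → Pre_unique_authors count metadata → Spec_unique_authors count metadata (unique_authors count metadata)

-- ===== LEMMAS AND PROOFS =====

-- reference recursion: rows whose lowered author was not seen before (first occurrences)
def uaFo (seen : List String) : List (List String) → List (List String)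
  | [] => []
  | d :: ms =>
      if seen.contains (uaKey d) then uaFo seen ms
      else d :: uaFo (seen ++ [uaKey d]) ms

-- for count ≤ 0 A's gate never opens, so its fold is constant
lemma ua_foldA_const_neg (count : Int) (hc : count ≤ 0) :
    ∀ (ms : List (List String)) (st : List String × List (List String)),
      ms.foldl (uaStepA count) st = st := by
  intro ms
  induction ms with
  | nil => intro st; rfl
  | cons r ms ih =>
      intro st
      have hgate : ¬ ((st.1.length : Int) < count) := by
        have := Int.natCast_nonneg st.1.length
        omega
      simp only [List.foldl_cons, uaStepA, if_neg hgate]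
      exact ih st

-- once the gate is closed A's fold is constant
lemma ua_foldA_const (count : Int) (ms : List (List String))
    (st : List String × List (List String)) (h : ¬ ((st.1.length : Int) < count)) :
    ms.foldl (uaStepA count) st = st := by
  induction ms with
  | nil => rfl
  | cons r ms ih => simp only [List.foldl_cons, uaStepA, if_neg h]; exact ih

-- A's gated fold is the count-prefix of the ungated first-occurrence recursion
lemma ua_gated (count : Int) (hc : 0 < count) :
    ∀ (ms : List (List String)) (s1 : List String) (s2 : List (List String)),
      (∀ r ∈ ms, 2 ≤ r.length) → s1.length = s2.length →
      ms.foldl (uaStepA count) (s1.take count.toNat, s2.take count.toNat)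
        = ((s1 ++ (uaFo s1 ms).map uaKey).take count.toNat,
           (s2 ++ uaFo s1 ms).take count.toNat) := by
  intro ms
  induction ms with
  | nil => intro s1 s2 _ _; simp [uaFo]
  | cons d ms ih =>
      intro s1 s2 hlen hs
      have hd : 2 ≤ d.length := hlen d List.mem_cons_self
      have hlen' : ∀ r ∈ ms, 2 ≤ r.length := fun r h => hlen r (List.mem_cons_of_mem _ h)
      match d, hd with
      | a :: b :: rest, _ =>
        have hget : PySem.List.pyGet? (a :: b :: rest) 1 = some b := by
          simp [PySem.List.pyGet?, PySem.List.pyIdx?]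
        have hkey : uaKey (a :: b :: rest) = PySem.Str.lower b := by
          simp [uaKey]
        by_cases hopen : s1.length < count.toNat
        · -- gate open: take is the identity on the state
          have ht1 : s1.take count.toNat = s1 := List.take_of_length_le (Nat.le_of_lt hopen)
          have ht2 : s2.take count.toNat = s2 := List.take_of_length_le (by omega)
          have hgate : ((s1.length : Int) < count) := by omega
          rw [List.foldl_cons, ht1, ht2]
          by_cases hmem : PySem.Str.lower b ∈ s1
          · have hA : uaStepA count (s1, s2) (a :: b :: rest) = (s1, s2) := by
              simp [uaStepA, hgate, hmem]
            have hF : uaFo s1 ((a :: b :: rest) :: ms) = uaFo s1 ms := by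
              simp [uaFo, hkey, hmem]
            have ih' := ih s1 s2 hlen' hs
            rw [ht1, ht2] at ih'
            rw [hA, hF, ih']
          · have hA : uaStepA count (s1, s2) (a :: b :: rest)
                = (s1 ++ [PySem.Str.lower b], s2 ++ [a :: b :: rest]) := by
              simp [uaStepA, hgate, hmem]
            have hF : uaFo s1 ((a :: b :: rest) :: ms)
                = (a :: b :: rest) :: uaFo (s1 ++ [PySem.Str.lower b]) ms := by
              simp [uaFo, hkey, hmem]
            have ht1' : (s1 ++ [PySem.Str.lower b]).take count.toNat
                = s1 ++ [PySem.Str.lower b] :=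
              List.take_of_length_le (by simp; omega)
            have ht2' : (s2 ++ [a :: b :: rest]).take count.toNat
                = s2 ++ [a :: b :: rest] :=
              List.take_of_length_le (by simp; omega)
            have ih' := ih (s1 ++ [PySem.Str.lower b]) (s2 ++ [a :: b :: rest]) hlen'
              (by simp [hs])
            rw [ht1', ht2'] at ih'
            rw [hA, hF, ih']
            simp [hkey, List.append_assoc]
        · -- gate closed: A skips everything; the appended tail lies beyond the slice
          have hle : count.toNat ≤ s1.length := Nat.le_of_not_lt hopen
          have hgate : ¬ (((s1.take count.toNat).length : Int) < count) := by
            rw [List.length_take]; omega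
          rw [ua_foldA_const count _ _ hgate,
              List.take_append_of_le_length hle,
              List.take_append_of_le_length (by omega)]

-- index? finds position n exactly when the value sits at n with no earlier occurrence
lemma ua_index?_eq_iff (xs : List String) (n : Nat) (hn : n < xs.length)
    (v : String) (hv : xs[n] = v) :
    PySem.List.index? xs v = some n ↔ v ∉ xs.take n := by
  constructor
  · intro h hmem
    obtain ⟨hk, _, hne⟩ := PySem.List.getElem_of_index?_eq_some h
    obtain ⟨j, hj, hje⟩ := List.mem_take_iff_getElem.mp hmem
    exact hne j (by omega) (by simpa [hje] using hje ▸ rfl)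
  · intro hnm
    rw [PySem.List.index?_eq_some_iff]
    refine ⟨xs.take n, xs.drop (n + 1), ?_, by simp [List.length_take]; omega, hnm⟩
    conv_lhs => rw [← List.take_append_drop n xs]
    have : xs.drop n = v :: xs.drop (n + 1) := by
      rw [List.drop_eq_getElem_cons hn, hv]
    rw [this]

-- B's index-based filter over the enumerated suffix equals the seen-recursion
lemma ua_filter_eq_fo (metadata : List (List String)) :
    ∀ (ms : List (List String)) (n : Nat) (seen : List String),
      metadata.drop n = ms →
      (∀ x, x ∈ seen ↔ x ∈ (metadata.map uaKey).take n) →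
      (PySem.List.enumerate ms (n : Int)).filterMap (fun p =>
        if (PySem.List.index? (metadata.map uaKey)
              ((PySem.List.pyGet? (metadata.map uaKey) p.1).getD "")).map
            (Int.ofNat) = some p.1
        then some p.2 else none)
        = uaFo seen ms := by
  intro ms
  induction ms with
  | nil => intro n seen _ _; simp [PySem.List.enumerate, uaFo]
  | cons d ms ih =>
      intro n seen hdrop hseen
      have hn : n < metadata.length := by
        by_contra h
        rw [List.drop_eq_nil_of_le (by omega)] at hdrop
        exact List.cons_ne_nil _ _ hdrop.symm
      have hget : metadata[n] = d := by
        have h0 : (metadata.drop n)[0]'(by rw [hdrop]; simp) = d := by simp [hdrop]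
        rw [List.getElem_drop] at h0
        simpa using h0
      have hnl : n < (metadata.map uaKey).length := by simpa using hn
      have hkey : (metadata.map uaKey)[n] = uaKey d := by simp [hget]
      have hpy : PySem.List.pyGet? (metadata.map uaKey) (n : Int)
          = some (uaKey d) := by
        rw [PySem.List.pyGet?_natCast _ _ , List.getElem?_eq_getElem hnl, hkey]
      have hdrop' : metadata.drop (n + 1) = ms := by
        have := congrArg (List.drop 1) hdrop
        simpa [List.drop_drop, Nat.add_comm] using this
      rw [PySem.List.enumerate_cons, List.filterMap_cons]
      have hiff := ua_index?_eq_iff (metadata.map uaKey) n hnl (uaKey d) hkey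
      by_cases hmem : seen.contains (uaKey d)
      · -- already seen: filter condition fails
        have hm : uaKey d ∈ (metadata.map uaKey).take n :=
          (hseen _).mp (by simpa using hmem)
        have hcond : ¬ (PySem.List.index? (metadata.map uaKey) (uaKey d)).map
            (Int.ofNat) = some ((n : Int)) := by
          intro h
          rcases Option.map_eq_some_iff.mp h with ⟨k, hk, hke⟩
          have hkn : (k : Int) = (n : Int) := hke
          have : k = n := by exact_mod_cast hkn
          exact (hiff.mp (this ▸ hk)) hm
        simp only [hpy, Option.getD_some, if_neg hcond]
        rw [uaFo, if_pos hmem]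
        exact ih (n + 1) seen hdrop' (by
          intro x
          have htake : (metadata.map uaKey).take (n + 1)
              = (metadata.map uaKey).take n ++ [uaKey d] := by
            rw [List.take_add_one, List.getElem?_eq_getElem hnl, hkey]; rfl
          have hds : uaKey d ∈ seen := by simpa using hmem
          rw [htake]
          simp only [List.mem_append, List.mem_singleton]
          constructor
          · intro h; exact Or.inl ((hseen x).mp h)
          · rintro (h | rfl)
            · exact (hseen x).mpr h
            · exact hds)
      · -- first occurrence: filter keeps the row
        have hm : uaKey d ∉ (metadata.map uaKey).take n := fun h =>
          hmem ((List.contains_iff_mem).mpr ((hseen _).mpr h))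
        have hcond : (PySem.List.index? (metadata.map uaKey) (uaKey d)).map
            (Int.ofNat) = some ((n : Int)) := by
          rw [hiff.mpr hm]; rfl
        simp only [hpy, Option.getD_some, if_pos hcond]
        rw [uaFo, if_neg hmem]
        congr 1
        exact ih (n + 1) (seen ++ [uaKey d]) hdrop' (by
          intro x
          have htake : (metadata.map uaKey).take (n + 1)
              = (metadata.map uaKey).take n ++ [uaKey d] := by
            rw [List.take_add_one, List.getElem?_eq_getElem hnl, hkey]; rfl
          simp [htake, hseen x])

-- ===== VERDICT (by name: the statement is the Claim_ definition above) =====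
theorem unique_authors_spec : Claim_equal_unique_authors := by
  intro count metadata _ hpre
  unfold Spec_unique_authors unique_authors unique_authors_alt
  by_cases hc : count ≤ 0
  · rw [if_pos hc, ua_foldA_const_neg count hc]
  · rw [if_neg hc]
    rcases hpre with hpre | hpre
    · exact absurd hpre hc
    · have hfo := ua_filter_eq_fo metadata metadata 0 [] (by simp) (by simp)
      have hg := ua_gated count (by omega) metadata [] [] hpre rfl
      simp only [List.take_nil, List.nil_append] at hg
      simp only [Int.ofNat_zero] at hfo
      rw [hg]
      simp only []
      rw [hfo]
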